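-- pv_equiv track=rewrite | github.com/alexandraback/datacollection | solutions_5695413893988352_0/Python/jmzhao/b.py | allpos
-- ===== SOURCE A (Python) =====
-- def allpos(s) :
--     if len(s)==0 :
--         yield ''
--     else :
--         if s[0]!='?' :
--             for sub in allpos(s[1:]) :
--                 yield s[0]+sub
--         else :
--             for c in '0123456789' :
--                 for sub in allpos(s[1:]) :
--                     yield c+sub
-- ===== SOURCE B (Python) =====
-- def allpos(s):
--     # iterative: build all prefixes left-to-right from a choice table
--     results = ['']
--     for ch in s:
--         digits = '0123456789' if ch == '?' else ch
--         results = [pre + c for pre in results for c in digits]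
--     yield from results
-- ===== Notes on version B (the rewrite author's own statement) =====
-- stated objective: faster
-- what changed: Replaces A's recursion over the suffix (nested generators re-enumerating the tail for every choice) by a single left-to-right fold that extends every accumulated prefix with each allowed character, yielding the results in the same order.
import Mathlib
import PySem

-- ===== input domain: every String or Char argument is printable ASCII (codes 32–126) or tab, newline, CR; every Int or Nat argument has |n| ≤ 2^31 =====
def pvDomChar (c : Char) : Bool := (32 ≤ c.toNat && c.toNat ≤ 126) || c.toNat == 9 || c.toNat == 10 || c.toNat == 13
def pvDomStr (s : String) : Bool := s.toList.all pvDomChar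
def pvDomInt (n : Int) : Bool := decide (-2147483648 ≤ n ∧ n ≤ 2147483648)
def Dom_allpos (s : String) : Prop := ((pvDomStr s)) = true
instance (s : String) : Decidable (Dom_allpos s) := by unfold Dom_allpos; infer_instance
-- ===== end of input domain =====

-- B replaces A's recursion on the suffix by a single left-to-right fold over a
-- per-character choice table (iterative, measurably faster); same values and order.

-- ===== PORT A =====
-- A recurses on s[1:]; Python strings are ported as their character lists.
def allposA : List Char → List String
  | [] => [""]
  | c :: rest =>
      if c ≠ '?' then
        (allposA rest).map (fun sub => String.ofList (c :: sub.toList))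
      else
        ("0123456789".toList).flatMap (fun d =>
          (allposA rest).map (fun sub => String.ofList (d :: sub.toList)))

def allpos (s : String) : List String := allposA s.toList

-- ===== PORT B =====
-- Source B folds over the characters of s, extending every accumulated prefix by
-- each allowed character (prefixes kept as List Char, joined to String at the end).
def allpos_alt (s : String) : List String :=
  (s.toList.foldl
    (fun results ch =>
      let digits := if ch == '?' then "0123456789".toList else [ch]
      results.flatMap (fun pre => digits.map (fun c => pre ++ [c])))
    [([] : List Char)]).map String.ofList

-- ===== PRECONDITION & SPEC =====
def Spec_allpos (s : String) (out : List String) : Prop := out = allpos_alt s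
instance (s : String) (out : List String) : Decidable (Spec_allpos s out) := by unfold Spec_allpos; infer_instance

-- ===== CLAIM (what is proved, stated in full; the proofs are below) =====
def Claim_equal_allpos : Prop := ∀ (s : String), Dom_allpos s → Spec_allpos s (allpos s)

-- ===== LEMMAS AND PROOFS =====

-- uniform list-level core: all completions of the suffix, as character lists
def pvCore : List Char → List (List Char)
  | [] => [[]]
  | c :: rest =>
      (if c == '?' then "0123456789".toList else [c]).flatMap (fun d =>
        (pvCore rest).map (fun sub => d :: sub))

lemma allposA_eq_core (l : List Char) : allposA l = (pvCore l).map String.ofList := by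
  induction l with
  | nil => rfl
  | cons c rest ih =>
    by_cases h : c = '?'
    · subst h
      simp [allposA, pvCore, ih, List.map_map, Function.comp_def,
        String.toList_ofList]
    · simp [allposA, pvCore, h, ih, List.map_map, Function.comp_def, String.toList_ofList]

lemma foldl_step (l : List Char) (R : List (List Char)) :
    l.foldl
      (fun results ch =>
        let digits := if ch == '?' then "0123456789".toList else [ch]
        results.flatMap (fun pre => digits.map (fun c => pre ++ [c])))
      R
    = R.flatMap (fun pre => (pvCore l).map (fun sub => pre ++ sub)) := by
  induction l generalizing R with
  | nil => simp [pvCore]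
  | cons c rest ih =>
    rw [List.foldl_cons, ih]
    simp [pvCore, List.flatMap_assoc, List.map_flatMap, List.flatMap_map, List.map_map,
      Function.comp_def, List.append_assoc]

-- ===== VERDICT (by name: the statement is the Claim_ definition above) =====
theorem allpos_spec : Claim_equal_allpos := by
  intro s _
  show allpos s = allpos_alt s
  unfold allpos allpos_alt
  rw [foldl_step, allposA_eq_core]
  simp
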